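-- pv_equiv track=rewrite | github.com/yuanjun-liu/GPE | _tool/mList.py | bisearch_mstep
-- ===== SOURCE A (Python) =====
-- def bisearch_mstep(sorted: list, x, mstep: int) -> int:
--     """只走m步的近似二分搜索"""
--     l, r = (0, len(sorted) - 1)
--     for _ in range(mstep):
--         if l >= r:
--             return l
--         h = (l + r) // 2
--         if sorted[h] < x:
--             l = h + 1
--         elif sorted[h] > x:
--             r = h
--         else:
--             return h
--     return l
-- ===== SOURCE B (Python) =====
-- def bisearch_mstep(sorted: list, x, mstep: int) -> int:
--     """Approximate binary search limited to mstep steps, as recursion on the interval."""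
--     def go(l, r, steps):
--         if steps <= 0:
--             return l
--         if l >= r:
--             return l
--         h = (l + r) // 2
--         if sorted[h] < x:
--             return go(h + 1, r, steps - 1)
--         if sorted[h] > x:
--             return go(l, h, steps - 1)
--         return h
--     return go(0, len(sorted) - 1, mstep)
-- ===== Notes on version B (the rewrite author's own statement) =====
-- stated objective: alternative
-- what changed: Replaced the flat for-loop over range(mstep) with mutable l/r state and early returns by a recursive helper go(l, r, steps) that recurses on the shrinking interval with a remaining-step counter.
import Mathlib
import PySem

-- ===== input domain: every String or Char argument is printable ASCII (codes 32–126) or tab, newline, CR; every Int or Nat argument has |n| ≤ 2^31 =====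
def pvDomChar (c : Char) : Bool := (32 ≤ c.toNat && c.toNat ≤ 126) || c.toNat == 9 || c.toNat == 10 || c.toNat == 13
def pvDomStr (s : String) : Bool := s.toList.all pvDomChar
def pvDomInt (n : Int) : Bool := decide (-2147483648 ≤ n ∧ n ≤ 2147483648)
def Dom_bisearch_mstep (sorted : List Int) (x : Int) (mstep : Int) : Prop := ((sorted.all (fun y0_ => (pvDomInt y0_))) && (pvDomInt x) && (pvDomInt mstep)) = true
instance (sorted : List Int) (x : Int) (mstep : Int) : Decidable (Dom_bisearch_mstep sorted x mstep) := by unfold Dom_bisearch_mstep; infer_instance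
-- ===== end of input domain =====

-- B rewrites A's flat step loop as recursion on the (l, r) interval with a step counter; same values everywhere.

-- ===== PORT A =====
-- The for-loop with early returns is folded over range(mstep): .inl v = already returned v, .inr (l, r) = still looping.
-- The 'none' branch of pyGet? would be Python's IndexError; it is unreachable (the loop keeps 0 ≤ l ≤ h < r ≤ len-1 there).
def bisearch_mstep (sorted : List Int) (x : Int) (mstep : Int) : Int :=
  match (PySem.List.pyRange 0 mstep 1).foldl (fun st _ =>
    match st with
    | .inl v => .inl v
    | .inr (l, r) =>
      if l ≥ r then .inl l
      else
        let h := PySem.Int.floordiv (l + r) 2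
        match PySem.List.pyGet? sorted h with
        | some v => if v < x then .inr (h + 1, r) else if v > x then .inr (l, h) else .inl h
        | none => .inl 0)
    (Sum.inr (0, (sorted.length : Int) - 1) : Sum Int (Int × Int)) with
  | .inl v => v
  | .inr (l, _) => l

-- ===== PORT B =====
def bisearchGo (sorted : List Int) (x : Int) (l r : Int) : Nat → Int
  | 0 => l
  | steps + 1 =>
    if l ≥ r then l
    else
      let h := PySem.Int.floordiv (l + r) 2
      match PySem.List.pyGet? sorted h with
      | some v =>
        if v < x then bisearchGo sorted x (h + 1) r steps
        else if v > x then bisearchGo sorted x l h steps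
        else h
      | none => 0

def bisearch_mstep_alt (sorted : List Int) (x : Int) (mstep : Int) : Int :=
  bisearchGo sorted x 0 ((sorted.length : Int) - 1) mstep.toNat

-- ===== PRECONDITION & SPEC =====
def Spec_bisearch_mstep (sorted : List Int) (x : Int) (mstep : Int) (out : Int) : Prop := out = bisearch_mstep_alt sorted x mstep
instance (sorted : List Int) (x : Int) (mstep : Int) (out : Int) : Decidable (Spec_bisearch_mstep sorted x mstep out) := by unfold Spec_bisearch_mstep; infer_instance

-- ===== CLAIM (what is proved, stated in full; the proofs are below) =====
def Claim_equal_bisearch_mstep : Prop := ∀ (sorted : List Int) (x : Int) (mstep : Int), Dom_bisearch_mstep sorted x mstep → Spec_bisearch_mstep sorted x mstep (bisearch_mstep sorted x mstep)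

-- ===== LEMMAS AND PROOFS =====
def pvStep (sorted : List Int) (x : Int) : Sum Int (Int × Int) → Int → Sum Int (Int × Int) :=
  fun st _ =>
    match st with
    | .inl v => .inl v
    | .inr (l, r) =>
      if l ≥ r then .inl l
      else
        let h := PySem.Int.floordiv (l + r) 2
        match PySem.List.pyGet? sorted h with
        | some v => if v < x then .inr (h + 1, r) else if v > x then .inr (l, h) else .inl h
        | none => .inl 0

def pvUnwrap : Sum Int (Int × Int) → Int
  | .inl v => v
  | .inr (l, _) => l

theorem pvFoldl_inl (sorted : List Int) (x v : Int) (L : List Int) :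
    L.foldl (pvStep sorted x) (.inl v) = .inl v := by
  induction L with
  | nil => rfl
  | cons a t ih => simpa [pvStep] using ih

theorem bisearchGo_succ (sorted : List Int) (x l r : Int) (n : Nat) :
    bisearchGo sorted x l r (n + 1) =
    (if l ≥ r then l
     else
       match PySem.List.pyGet? sorted (PySem.Int.floordiv (l + r) 2) with
       | some v =>
         if v < x then bisearchGo sorted x (PySem.Int.floordiv (l + r) 2 + 1) r n
         else if v > x then bisearchGo sorted x l (PySem.Int.floordiv (l + r) 2) n
         else PySem.Int.floordiv (l + r) 2
       | none => 0) := rfl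

theorem pvStep_inr (sorted : List Int) (x l r a : Int) :
    pvStep sorted x (.inr (l, r)) a =
    (if l ≥ r then .inl l
     else
       match PySem.List.pyGet? sorted (PySem.Int.floordiv (l + r) 2) with
       | some v => if v < x then .inr (PySem.Int.floordiv (l + r) 2 + 1, r)
                   else if v > x then .inr (l, PySem.Int.floordiv (l + r) 2)
                   else .inl (PySem.Int.floordiv (l + r) 2)
       | none => .inl 0) := rfl

theorem pvFoldl_eq_go (sorted : List Int) (x : Int) (L : List Int) :
    ∀ l r : Int, pvUnwrap (L.foldl (pvStep sorted x) (.inr (l, r))) = bisearchGo sorted x l r L.length := by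
  induction L with
  | nil => intro l r; rfl
  | cons a t ih =>
    intro l r
    rw [List.foldl_cons, List.length_cons, bisearchGo_succ, pvStep_inr]
    by_cases hlr : l ≥ r
    · rw [if_pos hlr, if_pos hlr, pvFoldl_inl]; rfl
    · rw [if_neg hlr, if_neg hlr]
      cases hg : PySem.List.pyGet? sorted (PySem.Int.floordiv (l + r) 2) with
      | none => rw [pvFoldl_inl]; rfl
      | some v =>
        dsimp only
        by_cases h1 : v < x
        · rw [if_pos h1, if_pos h1]; exact ih _ _
        · rw [if_neg h1, if_neg h1]
          by_cases h2 : v > x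
          · rw [if_pos h2, if_pos h2]; exact ih _ _
          · rw [if_neg h2, if_neg h2, pvFoldl_inl]; rfl

-- ===== VERDICT (by name: the statement is the Claim_ definition above) =====
theorem bisearch_mstep_spec : Claim_equal_bisearch_mstep := by
  intro sorted x mstep _
  show bisearch_mstep sorted x mstep = bisearch_mstep_alt sorted x mstep
  have h := pvFoldl_eq_go sorted x (PySem.List.pyRange 0 mstep 1) 0 ((sorted.length : Int) - 1)
  rw [PySem.List.length_pyRange_one, Int.sub_zero] at h
  exact h
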